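-- pv_equiv track=rewrite | github.com/sambuaneesh/compsy-pro | src/css/representations/token_alignment.py | align_words_exact
-- ===== SOURCE A (Python) =====
-- from collections import defaultdict
--
-- def align_words_exact(words_a: list[str], words_b: list[str]) -> list[tuple[int, int]]:
--     buckets: dict[str, list[int]] = defaultdict(list)
--     for j, w in enumerate(words_b):
--         buckets[w.lower()].append(j)
--
--     used_b: set[int] = set()
--     alignments: list[tuple[int, int]] = []
--
--     for i, w in enumerate(words_a):
--         candidates = buckets.get(w.lower(), [])
--         chosen = next((j for j in candidates if j not in used_b), None)
--         if chosen is not None: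
--             used_b.add(chosen)
--             alignments.append((i, chosen))
--
--     return alignments
-- ===== SOURCE B (Python) =====
-- def align_words_exact(words_a: list[str], words_b: list[str]) -> list[tuple[int, int]]:
--     # No precomputed buckets: for each word of words_a, scan words_b left to
--     # right for the first unused case-insensitive match.
--     used_b: set[int] = set()
--     alignments: list[tuple[int, int]] = []
--     for i, w in enumerate(words_a):
--         target = w.lower()
--         for j, v in enumerate(words_b):
--             if j not in used_b and v.lower() == target:
--                 used_b.add(j)
--                 alignments.append((i, j))
--                 break
--     return alignments
-- ===== Notes on version B (the rewrite author's own statement) =====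
-- stated objective: simpler
-- what changed: Removed the bucket-index build pass and dict lookups entirely; B scans words_b left-to-right for the first unused case-insensitive match for each word of words_a, which yields the same choice since buckets listed candidates in increasing index order.
import Mathlib
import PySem

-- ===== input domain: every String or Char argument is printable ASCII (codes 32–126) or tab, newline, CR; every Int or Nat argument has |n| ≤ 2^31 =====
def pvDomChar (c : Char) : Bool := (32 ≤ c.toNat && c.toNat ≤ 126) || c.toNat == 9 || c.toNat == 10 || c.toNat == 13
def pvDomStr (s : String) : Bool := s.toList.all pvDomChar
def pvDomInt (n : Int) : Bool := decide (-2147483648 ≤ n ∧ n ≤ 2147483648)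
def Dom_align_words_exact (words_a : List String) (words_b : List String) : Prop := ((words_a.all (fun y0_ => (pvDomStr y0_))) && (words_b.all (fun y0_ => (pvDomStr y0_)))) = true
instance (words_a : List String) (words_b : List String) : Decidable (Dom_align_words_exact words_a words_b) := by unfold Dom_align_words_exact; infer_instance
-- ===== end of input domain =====

-- B drops A's bucket-index build pass: it scans words_b left to right per word (objective: simpler).

-- ===== PORT A =====
def align_words_exact (words_a : List String) (words_b : List String) : List (Int × Int) :=
  let buckets : PySem.Dict String (List Int) :=
    (PySem.List.enumerate words_b).foldl
      (fun d p => d.modify (PySem.Str.lower p.2) [] (fun l => l ++ [p.1])) PySem.Dict.empty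
  ((PySem.List.enumerate words_a).foldl
    (fun (st : PySem.Set Int × List (Int × Int)) p =>
      let candidates := buckets.getD (PySem.Str.lower p.2) []
      match candidates.find? (fun j => !(PySem.Set.contains st.1 j)) with
      | some j => (PySem.Set.add st.1 j, st.2 ++ [(p.1, j)])
      | none => st) (PySem.Set.empty, [])).2

-- ===== PORT B =====
-- first j (left-to-right over words_b) not yet used whose lowercased word equals target
def findFirstFree (words_b : List String) (target : String) (used : PySem.Set Int) : Option Int :=
  ((PySem.List.enumerate words_b).find?
    (fun p => !(PySem.Set.contains used p.1) && (PySem.Str.lower p.2 == target))).map (·.1)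

def align_words_exact_alt (words_a : List String) (words_b : List String) : List (Int × Int) :=
  ((PySem.List.enumerate words_a).foldl
    (fun (st : PySem.Set Int × List (Int × Int)) p =>
      match findFirstFree words_b (PySem.Str.lower p.2) st.1 with
      | some j => (PySem.Set.add st.1 j, st.2 ++ [(p.1, j)])
      | none => st) (PySem.Set.empty, [])).2

-- ===== PRECONDITION & SPEC =====
def Spec_align_words_exact (words_a : List String) (words_b : List String) (out : List (Int × Int)) : Prop := out = align_words_exact_alt words_a words_b
instance (words_a : List String) (words_b : List String) (out : List (Int × Int)) : Decidable (Spec_align_words_exact words_a words_b out) := by unfold Spec_align_words_exact; infer_instance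

-- ===== CLAIM (what is proved, stated in full; the proofs are below) =====
def Claim_equal_align_words_exact : Prop := ∀ (words_a : List String) (words_b : List String), Dom_align_words_exact words_a words_b → Spec_align_words_exact words_a words_b (align_words_exact words_a words_b)

-- ===== LEMMAS AND PROOFS =====

-- A's bucket for key k holds exactly the indices of lower-case matches, in order.
theorem bucket_getD (words_b : List String) (k : String) :
    ((PySem.List.enumerate words_b).foldl
      (fun d p => d.modify (PySem.Str.lower p.2) [] (fun l => l ++ [p.1]))
      (PySem.Dict.empty : PySem.Dict String (List Int))).getD k []
    = ((PySem.List.enumerate words_b).filter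
        (fun p => PySem.Str.lower p.2 == k)).map (·.1) := by
  generalize PySem.List.enumerate words_b = l
  have h := PySem.Dict.getD_foldl_modify_append
    (l.map (fun p : Int × String => (PySem.Str.lower p.2, p.1)))
    (PySem.Dict.empty : PySem.Dict String (List Int)) k
  simpa [List.foldl_map, List.filter_map, Function.comp] using h

-- "first unused among the ordered candidates" = "first unused match in a single scan"
theorem find?_filter_map_fst (l : List (Int × String)) (k : String) (used : PySem.Set Int) :
    ((l.filter (fun p => PySem.Str.lower p.2 == k)).map (·.1)).find?
      (fun j => !(PySem.Set.contains used j))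
    = (l.find? (fun p => !(PySem.Set.contains used p.1) && (PySem.Str.lower p.2 == k))).map (·.1) := by
  simp [PySem.Set.contains, Bool.and_comm]
  rfl

theorem align_words_exact_spec : Claim_equal_align_words_exact := by
  intro words_a words_b _
  unfold Spec_align_words_exact align_words_exact align_words_exact_alt
  show (List.foldl
      (fun (st : PySem.Set Int × List (Int × Int)) p =>
        match (((PySem.List.enumerate words_b).foldl
            (fun d p => d.modify (PySem.Str.lower p.2) [] (fun l => l ++ [p.1]))
            (PySem.Dict.empty : PySem.Dict String (List Int))).getD (PySem.Str.lower p.2) []).find?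
            (fun j => !(PySem.Set.contains st.1 j)) with
        | some j => (PySem.Set.add st.1 j, st.2 ++ [(p.1, j)])
        | none => st)
      (PySem.Set.empty, []) (PySem.List.enumerate words_a)).2
    = (List.foldl
      (fun (st : PySem.Set Int × List (Int × Int)) p =>
        match findFirstFree words_b (PySem.Str.lower p.2) st.1 with
        | some j => (PySem.Set.add st.1 j, st.2 ++ [(p.1, j)])
        | none => st)
      (PySem.Set.empty, []) (PySem.List.enumerate words_a)).2
  congr 1
  refine List.foldl_ext _ _ _ (fun st p _ => ?_)
  rw [bucket_getD, find?_filter_map_fst]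
  rfl
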